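-- pv_equiv track=rewrite | github.com/ethanrussett/Ethans_enigma | My-Enigma.py | ceasar_cipher_alphabet
-- ===== SOURCE A (Python) =====
-- def ceasar_cipher_alphabet(x):
-- 	alpha = "ABCDEFGHIJKLMNOPQRSTUVWXYZ"
-- 	cipher = []
-- 	i=0
-- 	k=65
-- 	l=0
-- 	alpha = alpha.lower()
-- 	for i in range(26):
-- 		j= alpha[i]
-- 		if (k+x) <= 90:
-- 			cipher.append(chr(k+x))
-- 			k=k+1
-- 		else:
-- 			cipher.append(chr(65+l))
-- 			l=l+1
-- 		i=i+1
-- 	alpha = join(cipher)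
-- 	return alpha.upper();
--
-- def join(lis):
-- 	a = ""
-- 	l = len(lis)
-- 	i = 0
-- 	for i in range(l):
-- 		b = lis.pop(0)
-- 		a = a + b
-- 	return a;
-- ===== SOURCE B (Python) =====
-- def ceasar_cipher_alphabet(x):
--     m = max(0, min(26, 26 - x))
--     head = ''.join(chr(65 + x + i) for i in range(m))
--     tail = ''.join(chr(65 + i) for i in range(26 - m))
--     return (head + tail).upper()
-- ===== Notes on version B (the rewrite author's own statement) =====
-- stated objective: simpler
-- what changed: Replaces A's single branched loop with k/l counters and a custom pop(0)-based join by computing the split point m = clamp(26 - x) up front and building the head and tail with two direct generator expressions.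
-- outside the precondition, e.g. on ceasar_cipher_alphabet(-66): A raises ValueError, B raises ValueError
import Mathlib
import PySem

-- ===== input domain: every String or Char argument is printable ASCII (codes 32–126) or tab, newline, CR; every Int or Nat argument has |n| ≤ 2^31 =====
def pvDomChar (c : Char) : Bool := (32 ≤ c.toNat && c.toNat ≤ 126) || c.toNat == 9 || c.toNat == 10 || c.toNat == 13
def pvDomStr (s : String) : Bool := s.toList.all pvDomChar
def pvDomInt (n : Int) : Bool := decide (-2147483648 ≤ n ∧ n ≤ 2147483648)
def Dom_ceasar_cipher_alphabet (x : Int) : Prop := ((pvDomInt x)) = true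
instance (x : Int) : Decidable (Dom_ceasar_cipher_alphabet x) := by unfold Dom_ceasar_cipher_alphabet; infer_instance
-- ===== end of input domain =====

-- B replaces A's branched loop with counters and its custom pop(0)-join by a clamped split point and two direct passes (objective: simpler).

-- chr(n): exact for 0 ≤ n < 0x110000; Python raises ValueError for n < 0, which Pre_ excludes (x ≤ -66).
def pvChr (n : Int) : Char := Char.ofNat n.toNat

-- ===== PORT A =====
-- A's loop body: j = alpha[i] (computed, unused); then the k/l-branched append.
def pvStepA (x : Int) (alpha : List Char) (st : List Char × Int × Int) (i : Nat) : List Char × Int × Int :=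
  let _j := PySem.List.pyGet? alpha (i : Int)
  if st.2.1 + x ≤ 90 then (st.1 ++ [pvChr (st.2.1 + x)], st.2.1 + 1, st.2.2)
  else (st.1 ++ [pvChr (65 + st.2.2)], st.2.1, st.2.2 + 1)

-- A's join helper: a = ""; for i in range(len(lis)): b = lis.pop(0); a = a + b
def pvJoinA (lis : List Char) : List Char :=
  ((List.range lis.length).foldl (fun (st : List Char × List Char) _i =>
      match st.2 with
      | [] => st            -- unreachable: the loop pops exactly length-many heads
      | b :: rest => (st.1 ++ [b], rest)) ([], lis)).1

-- strings handled at the code-point level (PySem.Chars.lower/upper on .toList)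
def ceasar_cipher_alphabet (x : Int) : String :=
  let alpha := "ABCDEFGHIJKLMNOPQRSTUVWXYZ".toList
  let alpha := PySem.Chars.lower alpha
  let st := (List.range 26).foldl (pvStepA x alpha) ([], 65, 0)
  String.ofList (PySem.Chars.upper (pvJoinA st.1))

-- ===== PORT B =====
def ceasar_cipher_alphabet_alt (x : Int) : String :=
  let m : Int := max 0 (min 26 (26 - x))
  let head := (List.range m.toNat).map (fun (i : Nat) => pvChr (65 + x + (i : Int)))
  let tail := (List.range (26 - m).toNat).map (fun (i : Nat) => pvChr (65 + (i : Int)))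
  String.ofList (PySem.Chars.upper (head ++ tail))

-- ===== PRECONDITION & SPEC =====
-- Pre_ excludes exactly x ≤ -66, where A's chr(65+x) raises ValueError (B's chr raises there too).
def Pre_ceasar_cipher_alphabet (x : Int) : Prop := -65 ≤ x
instance (x : Int) : Decidable (Pre_ceasar_cipher_alphabet x) := by unfold Pre_ceasar_cipher_alphabet; infer_instance
def pvWitness_ceasar_cipher_alphabet : Int := (3)
def Spec_ceasar_cipher_alphabet (x : Int) (out : String) : Prop := out = ceasar_cipher_alphabet_alt x
instance (x : Int) (out : String) : Decidable (Spec_ceasar_cipher_alphabet x out) := by unfold Spec_ceasar_cipher_alphabet; infer_instance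

-- ===== CLAIM (what is proved, stated in full; the proofs are below) =====
def Claim_equal_ceasar_cipher_alphabet : Prop := ∀ (x : Int), Dom_ceasar_cipher_alphabet x → Pre_ceasar_cipher_alphabet x → Spec_ceasar_cipher_alphabet x (ceasar_cipher_alphabet x)

-- ===== LEMMAS AND PROOFS =====

-- A's join loop pops exactly length-many heads and re-appends them in order.
lemma pvJoinA_go (idxs : List Nat) (acc rest : List Char) (h : idxs.length = rest.length) :
    (idxs.foldl (fun (st : List Char × List Char) _i =>
      match st.2 with
      | [] => st
      | b :: r => (st.1 ++ [b], r)) (acc, rest)).1 = acc ++ rest := by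
  induction idxs generalizing acc rest with
  | nil => cases rest with
    | nil => simp
    | cons b r => simp at h
  | cons i is ih =>
    cases rest with
    | nil => simp at h
    | cons b r =>
      simp only [List.foldl_cons]
      rw [ih (acc ++ [b]) r (by simpa using h)]
      simp

lemma pvJoinA_eq (l : List Char) : pvJoinA l = l := by
  unfold pvJoinA
  simpa using pvJoinA_go (List.range l.length) [] l (by simp)

-- Loop invariant for A's fold: after n steps the cipher is the shifted head (min n (26-x)⁺ chars)
-- followed by the wrapped tail, k counts head chars from 65, l counts tail chars.
lemma pvA_loop (x : Int) (alpha : List Char) (n : Nat) :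
    (List.range n).foldl (pvStepA x alpha) ([], 65, 0) =
      ((List.range (min n (26 - x).toNat)).map (fun (i : Nat) => pvChr (65 + x + (i : Int))) ++
       (List.range (n - min n (26 - x).toNat)).map (fun (i : Nat) => pvChr (65 + (i : Int))),
       65 + ((min n (26 - x).toNat : Nat) : Int), ((n - min n (26 - x).toNat : Nat) : Int)) := by
  induction n with
  | zero => simp
  | succ n ih =>
    rw [List.range_succ, List.foldl_append, ih]
    simp only [List.foldl_cons, List.foldl_nil, pvStepA]
    by_cases hn : n < (26 - x).toNat
    · have h2 : min n (26 - x).toNat = n := by omega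
      have h1 : min (n + 1) (26 - x).toNat = n + 1 := by omega
      rw [h2, h1, if_pos (show (65 : Int) + (n : Int) + x ≤ 90 by omega)]
      simp only [Nat.sub_self, List.range_zero, List.map_nil, List.append_nil, Prod.mk.injEq]
      refine ⟨?_, by push_cast; ring, trivial⟩
      rw [List.range_succ, List.map_append, List.map_cons, List.map_nil,
        show (65 : Int) + (n : Int) + x = 65 + x + (n : Int) by ring]
    · have h2 : min n (26 - x).toNat = (26 - x).toNat := by omega
      have h1 : min (n + 1) (26 - x).toNat = (26 - x).toNat := by omega
      rw [h2, h1, if_neg (show ¬ ((65 : Int) + (((26 - x).toNat : Nat) : Int) + x ≤ 90) by omega)]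
      simp only [Prod.mk.injEq]
      refine ⟨?_, trivial, by omega⟩
      rw [show n + 1 - (26 - x).toNat = (n - (26 - x).toNat) + 1 by omega,
        List.range_succ, List.map_append, List.map_cons, List.map_nil, ← List.append_assoc]

-- ===== VERDICT (by name: the statement is the Claim_ definition above) =====
theorem ceasar_cipher_alphabet_spec : Claim_equal_ceasar_cipher_alphabet := by
  intro x _ _
  unfold Spec_ceasar_cipher_alphabet ceasar_cipher_alphabet ceasar_cipher_alphabet_alt
  simp only [pvA_loop, pvJoinA_eq]
  have h1 : (max 0 (min 26 (26 - x))).toNat = min 26 (26 - x).toNat := by omega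
  have h2 : (26 - max 0 (min 26 (26 - x))).toNat = 26 - min 26 (26 - x).toNat := by omega
  rw [h1, h2]
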